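-- pv_equiv track=rewrite | github.com/Goqmail/GoQmail | update_emails_html_flag.py | is_html_content
-- ===== SOURCE A (Python) =====
-- def is_html_content(body):
--     """Determine if the content is HTML based on presence of HTML tags."""
--     if not body:
--         return False
--
--     html_indicators = ['<html', '<body', '<div', '<table', '<p>', '<span', '<a href', '<img', '<br']
--
--     for indicator in html_indicators:
--         if indicator in body.lower():
--             return True
--
--     return False
-- ===== SOURCE B (Python) =====
-- HTML_TAG_TAILS = ('html', 'body', 'div', 'table', 'p>', 'span', 'a href', 'img', 'br')
--
-- def is_html_content(body):
--     """Determine if the content is HTML based on presence of HTML tags."""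
--     if not body:
--         return False
--     parts = body.lower().split('<')
--     return any(seg.startswith(HTML_TAG_TAILS) for seg in parts[1:])
-- ===== Notes on version B (the rewrite author's own statement) =====
-- stated objective: alternative
-- what changed: A runs nine separate substring scans of the lowered body; B lowercases once, splits the body at each opening angle bracket, and checks whether any segment after a bracket begins with one of the nine tag tails (the indicators with their leading bracket removed), so only positions right after a bracket are ever examined.
import Mathlib
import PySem

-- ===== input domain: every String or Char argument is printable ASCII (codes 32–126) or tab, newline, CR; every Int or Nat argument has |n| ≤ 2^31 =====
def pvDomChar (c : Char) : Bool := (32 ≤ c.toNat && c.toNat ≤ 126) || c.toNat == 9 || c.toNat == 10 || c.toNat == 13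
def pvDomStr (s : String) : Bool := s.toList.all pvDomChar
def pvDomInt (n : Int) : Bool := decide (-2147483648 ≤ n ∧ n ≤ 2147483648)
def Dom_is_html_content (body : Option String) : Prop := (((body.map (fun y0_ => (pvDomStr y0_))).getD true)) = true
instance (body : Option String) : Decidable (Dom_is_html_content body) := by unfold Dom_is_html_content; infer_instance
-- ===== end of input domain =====

-- B replaces A's nine whole-body substring scans by one split on '<': a tag occurs in the
-- body iff some segment after a '<' starts with the tag's tail (alternative decomposition).

-- ===== PORT A =====
def pvTagsA : List (List Char) :=
  ["<html".toList, "<body".toList, "<div".toList, "<table".toList, "<p>".toList,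
   "<span".toList, "<a href".toList, "<img".toList, "<br".toList]

-- 'for indicator in html_indicators: if indicator in body.lower(): return True'
def pvLoopA : List (List Char) → List Char → Bool
  | [], _ => false
  | ind :: rest, s =>
      if PySem.Chars.isIn ind (PySem.Chars.lower s) then true else pvLoopA rest s

def is_html_content (body : Option String) : Bool :=
  match body with
  | none => false
  | some s => if s.toList = [] then false else pvLoopA pvTagsA s.toList

-- ===== PORT B =====
def pvTailsB : List (List Char) :=
  ["html".toList, "body".toList, "div".toList, "table".toList, "p>".toList,
   "span".toList, "a href".toList, "img".toList, "br".toList]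

-- 'parts = body.lower().split('<'); return any(seg.startswith(HTML_TAG_TAILS) for seg in parts[1:])'
def is_html_content_alt (body : Option String) : Bool :=
  match body with
  | none => false
  | some s =>
      if s.toList = [] then false
      else
        let parts := PySem.Chars.splitOn (PySem.Chars.lower s.toList) ['<']
        (PySem.List.slice parts (some 1) none).any
          (fun seg => pvTailsB.any (fun t => PySem.Chars.startswith seg t))

-- ===== PRECONDITION & SPEC =====
def Spec_is_html_content (body : Option String) (out : Bool) : Prop := out = is_html_content_alt body
instance (body : Option String) (out : Bool) : Decidable (Spec_is_html_content body out) := by unfold Spec_is_html_content; infer_instance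

-- ===== CLAIM (what is proved, stated in full; the proofs are below) =====
def Claim_equal_is_html_content : Prop := ∀ (body : Option String), Dom_is_html_content body → Spec_is_html_content body (is_html_content body)

-- ===== LEMMAS AND PROOFS =====

-- A's loop returns true iff some indicator is an infix of the lowered body
theorem pvLoopA_true_iff (inds : List (List Char)) (s : List Char) :
    pvLoopA inds s = true ↔ ∃ t ∈ inds, t <:+: PySem.Chars.lower s := by
  induction inds with
  | nil => simp [pvLoopA]
  | cons i rest ih =>
      simp only [pvLoopA]
      split_ifs with h
      · simp only [true_iff]
        exact ⟨i, List.mem_cons_self, (PySem.Chars.isIn_iff_infix i _).mp h⟩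
      · rw [ih]
        constructor
        · rintro ⟨t, ht, hinf⟩; exact ⟨t, List.mem_cons_of_mem _ ht, hinf⟩
        · rintro ⟨t, ht, hinf⟩
          rcases List.mem_cons.mp ht with rfl | ht'
          · exact absurd ((PySem.Chars.isIn_iff_infix t _).mpr hinf) (by simpa using h)
          · exact ⟨t, ht', hinf⟩

-- reference split on '<': (first segment, remaining segments)
def pvRefSplit : List Char → List Char × List (List Char)
  | [] => ([], [])
  | c :: cs =>
      let p := pvRefSplit cs
      if c = '<' then ([], p.1 :: p.2) else (c :: p.1, p.2)

theorem pvGo_eq_refSplit (fuel : Nat) (l : List Char) (cur : List Char) (acc : List (List Char))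
    (h : l.length ≤ fuel) :
    PySem.Chars.splitOn.go ['<'] fuel l cur acc
      = acc.reverse ++ (cur.reverse ++ (pvRefSplit l).1) :: (pvRefSplit l).2 := by
  induction fuel generalizing l cur acc with
  | zero =>
      have hl : l = [] := List.length_eq_zero_iff.mp (Nat.le_zero.mp h)
      subst hl
      simp [PySem.Chars.splitOn.go, pvRefSplit]
  | succ fuel ih =>
      cases l with
      | nil => simp [PySem.Chars.splitOn.go, pvRefSplit]
      | cons c cs =>
          rw [PySem.Chars.splitOn.go]
          by_cases hc : c = '<'
          · subst hc
            rw [if_pos (by simp [List.isPrefixOf])]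
            simp only [List.length_cons, List.length_nil, Nat.zero_add, List.drop_succ_cons,
              List.drop_zero]
            rw [ih cs [] (cur.reverse :: acc) (by simpa using Nat.le_of_succ_le_succ h)]
            simp [pvRefSplit]
          · rw [if_neg (by simp [List.isPrefixOf]; exact fun e => hc e.symm)]
            rw [ih cs (c :: cur) acc (by simpa using Nat.le_of_succ_le_succ h)]
            simp [pvRefSplit, hc]

theorem splitOn_eq_refSplit (l : List Char) :
    PySem.Chars.splitOn l ['<'] = (pvRefSplit l).1 :: (pvRefSplit l).2 := by
  rw [PySem.Chars.splitOn, pvGo_eq_refSplit (l.length + 1) l [] [] (Nat.le_succ _)]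
  simp

-- a '<'-free word is a prefix of the first segment iff it is a prefix of the whole list
theorem prefix_refSplit_head (cs : List Char) :
    ∀ t : List Char, '<' ∉ t → (t <+: (pvRefSplit cs).1 ↔ t <+: cs) := by
  induction cs with
  | nil => simp [pvRefSplit]
  | cons c cs ih =>
      intro t ht
      by_cases hc : c = '<'
      · subst hc
        simp only [pvRefSplit, reduceIte]
        constructor
        · intro hp
          have := List.prefix_nil.mp hp
          subst this; exact List.nil_prefix
        · intro hp
          cases t with
          | nil => exact List.nil_prefix
          | cons a t' =>
              rcases List.cons_prefix_cons.mp hp with ⟨rfl, _⟩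
              exact absurd List.mem_cons_self ht
      · simp only [pvRefSplit, if_neg hc]
        cases t with
        | nil => simp
        | cons a t' =>
            have ht' : '<' ∉ t' := fun hm => ht (List.mem_cons_of_mem _ hm)
            rw [List.cons_prefix_cons, List.cons_prefix_cons, ih t' ht']

-- a '<'-free word is a prefix of some later segment iff '<' ++ word is an infix
theorem tail_seg_iff_infix (t : List Char) (ht : '<' ∉ t) :
    ∀ cs : List Char, ((∃ seg ∈ (pvRefSplit cs).2, t <+: seg) ↔ ('<' :: t) <:+: cs) := by
  intro cs
  induction cs with
  | nil => simp [pvRefSplit]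
  | cons c cs ih =>
      by_cases hc : c = '<'
      · subst hc
        simp only [pvRefSplit, reduceIte]
        rw [List.infix_cons_iff]
        constructor
        · rintro ⟨seg, hseg, hp⟩
          rcases List.mem_cons.mp hseg with rfl | hseg'
          · exact Or.inl (List.cons_prefix_cons.mpr ⟨rfl, (prefix_refSplit_head cs t ht).mp hp⟩)
          · exact Or.inr (ih.mp ⟨seg, hseg', hp⟩)
        · rintro (hp | hinf)
          · rcases List.cons_prefix_cons.mp hp with ⟨-, hp'⟩
            exact ⟨(pvRefSplit cs).1, List.mem_cons_self, (prefix_refSplit_head cs t ht).mpr hp'⟩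
          · rcases ih.mpr hinf with ⟨seg, hseg, hp⟩
            exact ⟨seg, List.mem_cons_of_mem _ hseg, hp⟩
      · simp only [pvRefSplit, if_neg hc]
        rw [ih, List.infix_cons_iff]
        constructor
        · exact Or.inr
        · rintro (hp | hinf)
          · rcases List.cons_prefix_cons.mp hp with ⟨h1, -⟩
            exact absurd h1.symm hc
          · exact hinf

theorem pvTagsA_eq : pvTagsA = pvTailsB.map (fun t => '<' :: t) := by decide

theorem pvTailsB_no_lt : ∀ t ∈ pvTailsB, '<' ∉ t := by decide

-- ===== VERDICT (by name: the statement is the Claim_ definition above) =====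
theorem is_html_content_spec : Claim_equal_is_html_content := by
  intro body _
  unfold Spec_is_html_content is_html_content is_html_content_alt
  cases body with
  | none => rfl
  | some s =>
      simp only
      split_ifs with h
      · rfl
      · rw [Bool.eq_iff_iff, pvLoopA_true_iff]
        rw [splitOn_eq_refSplit]
        rw [show PySem.List.slice ((pvRefSplit (PySem.Chars.lower s.toList)).1
              :: (pvRefSplit (PySem.Chars.lower s.toList)).2) (some 1) none
            = (pvRefSplit (PySem.Chars.lower s.toList)).2 by
          simp [PySem.List.slice]]
        rw [List.any_eq_true]
        constructor
        · rintro ⟨tag, htag, hinf⟩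
          rw [pvTagsA_eq] at htag
          rcases List.mem_map.mp htag with ⟨t, ht, rfl⟩
          rcases (tail_seg_iff_infix t (pvTailsB_no_lt t ht) _).mpr hinf with ⟨seg, hseg, hp⟩
          exact ⟨seg, hseg, List.any_eq_true.mpr
            ⟨t, ht, (PySem.Chars.startswith_iff seg t).mpr hp⟩⟩
        · rintro ⟨seg, hseg, hany⟩
          rcases List.any_eq_true.mp hany with ⟨t, ht, hsw⟩
          refine ⟨'<' :: t, ?_, (tail_seg_iff_infix t (pvTailsB_no_lt t ht) _).mp
            ⟨seg, hseg, (PySem.Chars.startswith_iff seg t).mp hsw⟩⟩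
          rw [pvTagsA_eq]; exact List.mem_map.mpr ⟨t, ht, rfl⟩
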